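-- pv_equiv track=rewrite | github.com/envererguven/5g_with_mini_nef | mini_smsc/smsc.py | parse_sip
-- ===== SOURCE A (Python) =====
-- def parse_sip(data):
--     """Simple SIP parser for REGISTER and MESSAGE"""
--     lines = data.split('\r\n')
--     request_line = lines[0].split(' ')
--     method = request_line[0]
--     uri = request_line[1]
--     headers = {}
--     body = ""
--
--     is_body = False
--     for line in lines[1:]:
--         if line == "":
--             is_body = True
--             continue
--         if is_body:
--             body += line + "\n"
--         else:
--             if ": " in line:
--                 k, v = line.split(": ", 1)
--                 headers[k] = v
--
--     return method, uri, headers, body.strip()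
-- ===== SOURCE B (Python) =====
-- def parse_sip(data):
--     """Simple SIP parser for REGISTER and MESSAGE"""
--     lines = data.split('\r\n')
--     method, uri = lines[0].split(' ')[0], lines[0].split(' ')[1]
--     rest = lines[1:]
--     i = rest.index('') if '' in rest else len(rest)
--     headers = dict(l.split(': ', 1) for l in rest[:i] if ': ' in l)
--     body = '\n'.join(l for l in rest[i + 1:] if l).strip()
--     return method, uri, headers, body
-- ===== Notes on version B (the rewrite author's own statement) =====
-- stated objective: simpler
-- what changed: Replaces A's single stateful loop with an is_body flag by locating the first blank line once with index() and building headers and body declaratively from the two slices (dict of split pairs; '\n'.join of the non-empty body lines, stripped).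
import Mathlib
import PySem

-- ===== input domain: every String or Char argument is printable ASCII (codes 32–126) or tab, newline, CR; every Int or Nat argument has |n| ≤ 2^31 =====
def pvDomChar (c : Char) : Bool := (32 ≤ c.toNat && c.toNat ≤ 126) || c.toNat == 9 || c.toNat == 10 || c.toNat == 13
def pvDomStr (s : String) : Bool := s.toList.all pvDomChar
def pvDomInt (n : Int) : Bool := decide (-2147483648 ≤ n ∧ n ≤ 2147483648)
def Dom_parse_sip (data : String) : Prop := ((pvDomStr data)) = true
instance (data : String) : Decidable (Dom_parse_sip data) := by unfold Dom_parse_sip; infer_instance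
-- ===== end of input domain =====

-- B replaces A's stateful is_body-flag loop by locating the first blank line once and building
-- headers/body from slices (dict comprehension + join); objective: simpler, same cost.
-- String work is done on `toList` via PySem.Chars (exact on the admitted ASCII domain).

-- ===== PORT A =====
-- A's loop body, named (the for-loop's state is (is_body, headers, body)).
def pvStepA (st : Bool × PySem.Dict (List Char) (List Char) × List Char) (line : List Char) :
    Bool × PySem.Dict (List Char) (List Char) × List Char :=
  if line = [] then (true, st.2.1, st.2.2)
  else if st.1 then (st.1, st.2.1, st.2.2 ++ line ++ ['\n'])
  else if PySem.Chars.isIn [':', ' '] line then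
    -- k, v = line.split(': ', 1): exactly two parts since ': ' occurs in line
    let p := PySem.Chars.splitOnMax line [':', ' '] 1
    (st.1, st.2.1.insert (p.headD []) ((p.drop 1).headD []), st.2.2)
  else st

def parse_sip (data : String) : String × String × (List (String × String)) × String :=
  let lines := PySem.Chars.splitOn data.toList ['\r', '\n']
  let request_line := PySem.Chars.splitOn (lines.headD []) [' ']   -- lines[0]: split never returns []
  let method := request_line.headD []                              -- request_line[0]
  let uri := (request_line.drop 1).headD []                        -- request_line[1]; IndexError excluded by Pre_
  let st := (lines.drop 1).foldl pvStepA (false, PySem.Dict.empty, [])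
  (String.ofList method, String.ofList uri,
   st.2.1.items.map (fun kv => (String.ofList kv.1, String.ofList kv.2)),
   String.ofList (PySem.Chars.strip st.2.2))

-- ===== PORT B =====
-- the dict(...) generator's per-line insertion
def pvInsB (d : PySem.Dict (List Char) (List Char)) (l : List Char) :
    PySem.Dict (List Char) (List Char) :=
  let p := PySem.Chars.splitOnMax l [':', ' '] 1
  d.insert (p.headD []) ((p.drop 1).headD [])

def parse_sip_alt (data : String) : String × String × (List (String × String)) × String :=
  let lines := PySem.Chars.splitOn data.toList ['\r', '\n']
  let l0 := PySem.Chars.splitOn (lines.headD []) [' ']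
  let method := l0.headD []
  let uri := (l0.drop 1).headD []                                  -- IndexError excluded by Pre_
  let rest := lines.drop 1
  let i := (PySem.List.index? rest []).getD rest.length            -- rest.index('') if '' in rest else len(rest)
  let headers := ((rest.take i).filter (fun l => PySem.Chars.isIn [':', ' '] l)).foldl
      pvInsB PySem.Dict.empty
  let body := PySem.Chars.strip
      (PySem.Chars.join ['\n'] ((rest.drop (i + 1)).filter (fun l => l ≠ [])))
  (String.ofList method, String.ofList uri,
   headers.items.map (fun kv => (String.ofList kv.1, String.ofList kv.2)),
   String.ofList body)

-- ===== PRECONDITION & SPEC =====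
-- Pre_ excludes exactly the inputs whose request line (text before the first CRLF) contains no
-- space: there Python A raises IndexError on request_line[1] (and B raises too).
def Pre_parse_sip (data : String) : Prop :=
  PySem.Chars.isIn [' '] ((PySem.Chars.splitOn data.toList ['\r', '\n']).headD []) = true
instance (data : String) : Decidable (Pre_parse_sip data) := by unfold Pre_parse_sip; infer_instance

def pvWitness_parse_sip : String := "MESSAGE sip:alice SIP/2.0\r\nTo: alice\r\n\r\nhello"

def Spec_parse_sip (data : String) (out : String × String × (List (String × String)) × String) : Prop := out = parse_sip_alt data
instance (data : String) (out : String × String × (List (String × String)) × String) : Decidable (Spec_parse_sip data out) := by unfold Spec_parse_sip; infer_instance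

-- ===== CLAIM (what is proved, stated in full; the proofs are below) =====
def Claim_equal_parse_sip : Prop := ∀ (data : String), Dom_parse_sip data → Pre_parse_sip data → Spec_parse_sip data (parse_sip data)

-- ===== LEMMAS AND PROOFS =====

-- A's loop in header phase (no blank line seen): is_body stays false, body stays, headers fold.
theorem pvFoldA_header (l : List (List Char)) (d : PySem.Dict (List Char) (List Char))
    (b : List Char) (h : [] ∉ l) :
    l.foldl pvStepA (false, d, b)
      = (false, l.foldl (fun d x => if PySem.Chars.isIn [':', ' '] x then pvInsB d x else d) d, b) := by
  induction l generalizing d with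
  | nil => rfl
  | cons x t ih =>
    have hx : x ≠ [] := by intro hx; exact h (hx ▸ List.mem_cons_self)
    have ht : [] ∉ t := fun hm => h (List.mem_cons_of_mem _ hm)
    simp only [List.foldl_cons]
    rw [show pvStepA (false, d, b) x
          = (false, if PySem.Chars.isIn [':', ' '] x then pvInsB d x else d, b) by
        simp [pvStepA, pvInsB, hx]; split <;> rfl]
    rw [ih _ ht]

-- A's loop in body phase: headers frozen, nonblank lines appended with '\n'.
theorem pvFoldA_body (l : List (List Char)) (d : PySem.Dict (List Char) (List Char))
    (b : List Char) :
    l.foldl pvStepA (true, d, b)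
      = (true, d, b ++ ((l.filter (fun x => x ≠ [])).map (· ++ ['\n'])).flatten) := by
  induction l generalizing b with
  | nil => simp
  | cons x t ih =>
    by_cases hx : x = []
    · subst hx
      simp only [List.foldl_cons]
      rw [show pvStepA (true, d, b) [] = (true, d, b) from rfl, ih]
      simp
    · simp only [List.foldl_cons]
      rw [show pvStepA (true, d, b) x = (true, d, b ++ x ++ ['\n']) by simp [pvStepA, hx]]
      rw [ih]
      simp [hx, List.append_assoc]

-- right-stripping ignores a trailing newline
theorem pvStrip_newline (x : List Char) :
    PySem.Chars.strip (x ++ ['\n']) = PySem.Chars.strip x := by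
  have hnl : PySem.Chars.isspace '\n' = true := by decide
  unfold PySem.Chars.strip PySem.Chars.lstrip PySem.Chars.rstrip
  rw [List.dropWhile_append]
  by_cases h : (List.dropWhile PySem.Chars.isspace x).isEmpty
  · rw [if_pos h]
    simp only [List.isEmpty_iff] at h
    rw [h]
    simp [hnl]
  · rw [if_neg h]
    rw [List.reverse_append, show (['\n'] : List Char).reverse = ['\n'] from rfl,
      List.singleton_append, List.dropWhile_cons, hnl]
    simp

-- concatenating each line with '\n' is '\n'.join plus one trailing newline
theorem pvKey (m : List (List Char)) (hm : m ≠ []) :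
    ((m.map (· ++ ['\n'])).flatten) = PySem.Chars.join ['\n'] m ++ ['\n'] := by
  induction m with
  | nil => exact absurd rfl hm
  | cons a s ih =>
    cases s with
    | nil => simp [PySem.Chars.join_singleton]
    | cons b v =>
      have hs := ih (by simp)
      rw [PySem.Chars.join_cons_cons]
      simp only [List.map_cons, List.flatten_cons] at hs ⊢
      rw [hs]
      simp [List.append_assoc]

-- the loop's concatenation with trailing '\n' versus '\n'.join, under strip
theorem pvFlatten_join (l : List (List Char)) :
    PySem.Chars.strip ((l.map (· ++ ['\n'])).flatten)
      = PySem.Chars.strip (PySem.Chars.join ['\n'] l) := by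
  cases l with
  | nil => simp [PySem.Chars.join_nil]
  | cons x t => rw [pvKey _ (by simp), pvStrip_newline]

-- the blank line flips the flag, then the body phase runs
theorem pvFoldA_split (l : List (List Char)) (d : PySem.Dict (List Char) (List Char)) :
    (([] : List Char) :: l).foldl pvStepA (false, d, [])
      = (true, d, ((l.filter (fun x => x ≠ [])).map (· ++ ['\n'])).flatten) := by
  rw [List.foldl_cons, show pvStepA (false, d, []) [] = (true, d, []) from rfl, pvFoldA_body]
  simp

-- ===== VERDICT (by name: the statement is the Claim_ definition above) =====
theorem parse_sip_spec : Claim_equal_parse_sip := by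
  intro data _ _
  unfold Spec_parse_sip parse_sip parse_sip_alt
  simp only []
  set rest := (PySem.Chars.splitOn data.toList ['\r', '\n']).drop 1 with hrest
  refine Prod.ext rfl (Prod.ext rfl ?_)
  have main :
      (rest.foldl pvStepA (false, PySem.Dict.empty, [])).2.1
        = ((rest.take ((PySem.List.index? rest []).getD rest.length)).filter
            (fun l => PySem.Chars.isIn [':', ' '] l)).foldl pvInsB PySem.Dict.empty
      ∧ PySem.Chars.strip (rest.foldl pvStepA (false, PySem.Dict.empty, [])).2.2
        = PySem.Chars.strip (PySem.Chars.join ['\n']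
            ((rest.drop ((PySem.List.index? rest []).getD rest.length + 1)).filter
              (fun l => l ≠ []))) := by
    rcases hidx : PySem.List.index? rest [] with _ | i
    · -- no blank line: everything is headers, body is empty
      have hnm : [] ∉ rest := List.idxOf?_eq_none_iff.mp hidx
      simp only [Option.getD_none]
      rw [List.take_length, List.drop_eq_nil_of_le (by omega)]
      rw [pvFoldA_header rest PySem.Dict.empty [] hnm]
      constructor
      · simp [List.foldl_filter]
      · simp [PySem.Chars.join_nil]
    · -- rest = take i ++ [] :: drop (i+1), with no blank line among the first i
      obtain ⟨hilt, hgot, hfirst⟩ := List.idxOf?_eq_some_iff.mp hidx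
      have hsplit : rest = rest.take i ++ [] :: rest.drop (i + 1) := by
        conv_lhs => rw [← List.take_append_drop i rest]
        rw [List.drop_eq_getElem_cons hilt, hgot]
      have hnm : [] ∉ rest.take i := by
        intro hm
        obtain ⟨j, hj, hje⟩ := List.getElem_of_mem hm
        have hjlt : j < i := by
          have := hj; simp [List.length_take] at this; omega
        exact hfirst j hjlt (by rw [← hje, List.getElem_take])
      have hfold : rest.foldl pvStepA (false, PySem.Dict.empty, [])
          = (true,
             (rest.take i).foldl
               (fun d x => if PySem.Chars.isIn [':', ' '] x then pvInsB d x else d)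
               PySem.Dict.empty,
             (((rest.drop (i + 1)).filter (fun x => x ≠ [])).map (· ++ ['\n'])).flatten) := by
        conv_lhs => rw [hsplit]
        rw [List.foldl_append, pvFoldA_header _ _ _ hnm, pvFoldA_split]
      simp only [Option.getD_some, hfold]
      constructor
      · simp [List.foldl_filter]
      · exact pvFlatten_join _
  refine Prod.ext ?_ ?_
  · simp only [main.1]
  · simp only [main.2]
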